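-- pv_equiv track=rewrite | github.com/Rangel-h/Ovector | korthogonal.py | support_basis
-- ===== SOURCE A (Python) =====
-- from itertools import combinations, product
--
-- def subsets(s, k): # Generates all the subssets of "s" of size "k"
--     return list(combinations(s, k))
--
-- def support_basis(elements,r): # Create the support of all basis in reverse lexicographic order
--     elements1 = list(elements)
--     elements1.reverse()
--     SB = []
--     SB1 = subsets(elements1, r)
--     for B1 in SB1:
--         B2 = list(B1)
--         B2.reverse()
--         SB.append(B2)
--     SB.reverse()
--     return SB
-- ===== SOURCE B (Python) =====
-- def support_basis(elements, r):
--     # One-pass DP over elements: acc[k] holds all k-subsets of the prefix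
--     # seen so far, in colexicographic order (which is A's output order).
--     if len(elements) < r:
--         return []
--     acc = [[[]]] + [[] for _ in range(r)]
--     for x in elements:
--         acc = [acc[0]] + [acc[k] + [c + [x] for c in acc[k - 1]] for k in range(1, r + 1)]
--     return acc[r]
-- ===== Notes on version B (the rewrite author's own statement) =====
-- stated objective: alternative
-- what changed: Replaces the triple-reversal over itertools.combinations of the reversed list by a single-pass dynamic program that folds over the elements, maintaining for each size k the colex-ordered k-subsets of the prefix seen so far.
import Mathlib
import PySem

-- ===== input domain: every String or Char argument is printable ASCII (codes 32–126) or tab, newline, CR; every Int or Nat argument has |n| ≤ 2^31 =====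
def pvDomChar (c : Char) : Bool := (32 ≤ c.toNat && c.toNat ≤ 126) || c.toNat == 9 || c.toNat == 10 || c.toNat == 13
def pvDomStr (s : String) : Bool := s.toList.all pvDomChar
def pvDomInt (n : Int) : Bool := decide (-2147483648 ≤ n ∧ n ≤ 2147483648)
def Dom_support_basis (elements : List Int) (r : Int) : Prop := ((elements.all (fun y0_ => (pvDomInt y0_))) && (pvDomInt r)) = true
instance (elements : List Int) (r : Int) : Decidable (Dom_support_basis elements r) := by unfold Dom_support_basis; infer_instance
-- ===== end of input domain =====

-- B replaces A's reverse/combinations/reverse/reverse pipeline by a one-pass DP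
-- over the elements (objective: alternative decomposition, same cost).

-- ===== PORT A =====
-- itertools.combinations(s, k) in lexicographic order (A calls it via `subsets`)
def combosA : List Int → Nat → List (List Int)
  | _, 0 => [[]]
  | [], _ + 1 => []
  | x :: xs, k + 1 => (combosA xs k).map (fun c => x :: c) ++ combosA xs (k + 1)

def support_basis (elements : List Int) (r : Int) : List (List Int) :=
  let elements1 := elements.reverse
  let SB1 := combosA elements1 r.toNat
  let SB := SB1.map (fun B1 => B1.reverse)
  SB.reverse

-- ===== PORT B =====
-- one row update: given acc[k-1] (prev) and the tail acc[k], acc[k+1], …,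
-- produce acc[k] ++ [c + [x] for c in acc[k-1]] for each k (B's comprehension)
-- tail-recursive so the port evaluates on long accumulators (out collects the rows)
def rowsB (x : Int) : List (List Int) → List (List (List Int)) → List (List (List Int)) → List (List (List Int))
  | _, [], out => out.reverse
  | prev, a :: rest, out => rowsB x a rest ((a ++ prev.map (fun c => c ++ [x])) :: out)

-- acc = [acc[0]] + [acc[k] + [c+[x] for c in acc[k-1]] for k in range(1, r+1)]
def stepB (acc : List (List (List Int))) (x : Int) : List (List (List Int)) :=
  match acc with
  | [] => []
  | a0 :: rest => a0 :: rowsB x a0 rest []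

def support_basis_alt (elements : List Int) (r : Int) : List (List Int) :=
  if ((elements.length : Int) < r) then []
  else
  let acc0 : List (List (List Int)) := [[[]]] ++ List.replicate r.toNat []
  let acc := elements.foldl stepB acc0
  acc.getD r.toNat []

-- ===== PRECONDITION & SPEC =====
-- Pre_ excludes r < 0, on which Python A raises ValueError (combinations with negative r).
def Pre_support_basis (elements : List Int) (r : Int) : Prop := 0 ≤ r
instance (elements : List Int) (r : Int) : Decidable (Pre_support_basis elements r) := by unfold Pre_support_basis; infer_instance
def pvWitness_support_basis : List Int × Int := ([1, 2, 3], 2)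

def Spec_support_basis (elements : List Int) (r : Int) (out : List (List Int)) : Prop := out = support_basis_alt elements r
instance (elements : List Int) (r : Int) (out : List (List Int)) : Decidable (Spec_support_basis elements r out) := by unfold Spec_support_basis; infer_instance

-- ===== CLAIM (what is proved, stated in full; the proofs are below) =====
def Claim_equal_support_basis : Prop := ∀ (elements : List Int) (r : Int), Dom_support_basis elements r → Pre_support_basis elements r → Spec_support_basis elements r (support_basis elements r)

-- ===== LEMMAS AND PROOFS =====

-- F p k = A's result on prefix p with size k: colex-ordered k-subsets of p
def Fcolex (p : List Int) (k : Nat) : List (List Int) :=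
  ((combosA p.reverse k).map List.reverse).reverse

theorem Fcolex_zero (p : List Int) : Fcolex p 0 = [[]] := by
  simp [Fcolex, combosA]

theorem Fcolex_nil_succ (k : Nat) : Fcolex [] (k + 1) = [] := by
  simp [Fcolex, combosA]

theorem Fcolex_concat (p : List Int) (x : Int) (k : Nat) :
    Fcolex (p ++ [x]) (k + 1) = Fcolex p (k + 1) ++ (Fcolex p k).map (fun c => c ++ [x]) := by
  simp [Fcolex, combosA, List.map_map, Function.comp]

-- proof-side simple (non-accumulator) form of the comprehension
def rowsB0 (x : Int) : List (List Int) → List (List (List Int)) → List (List (List Int))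
  | _, [] => []
  | prev, a :: rest => (a ++ prev.map (fun c => c ++ [x])) :: rowsB0 x a rest

theorem rowsB_eq_rowsB0 (x : Int) (prev : List (List Int)) (rest out : List (List (List Int))) :
    rowsB x prev rest out = out.reverse ++ rowsB0 x prev rest := by
  induction rest generalizing prev out with
  | nil => simp [rowsB, rowsB0]
  | cons a rest ih => simp [rowsB, rowsB0, ih]

theorem rowsB0_map (x : Int) (g : Nat → List (List Int)) (m n : Nat) :
    rowsB0 x (g m) ((List.range' (m + 1) n).map g)
      = (List.range' (m + 1) n).map (fun k => g k ++ (g (k - 1)).map (fun c => c ++ [x])) := by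
  induction n generalizing m with
  | zero => simp [rowsB0]
  | succ n ih =>
    rw [List.range'_succ, List.map_cons, List.map_cons, rowsB0]
    have h := ih (m + 1)
    simp only [Nat.add_succ_sub_one] at *
    rw [h]
    simp

theorem stepB_map (x : Int) (g : Nat → List (List Int)) (r : Nat) :
    stepB ((List.range' 0 (r + 1)).map g) x
      = (List.range' 0 (r + 1)).map
          (fun k => if k = 0 then g 0 else g k ++ (g (k - 1)).map (fun c => c ++ [x])) := by
  rw [List.range'_succ, List.map_cons, List.map_cons]
  simp only [stepB]
  rw [rowsB_eq_rowsB0, List.reverse_nil, List.nil_append, rowsB0_map x g 0 r]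
  congr 1
  apply List.map_congr_left
  intro k hk
  have : k ≠ 0 := by
    have := List.mem_range'.mp hk
    omega
  simp [this]

theorem replicate_eq_map_F (n s : Nat) :
    List.replicate n ([] : List (List Int)) = (List.range' (s + 1) n).map (Fcolex []) := by
  induction n generalizing s with
  | zero => simp
  | succ m ih =>
    rw [List.replicate_succ, List.range'_succ, List.map_cons, Fcolex_nil_succ]
    exact congrArg _ (ih (s + 1))

theorem acc0_eq (r : Nat) :
    ([[([] : List Int)]] ++ List.replicate r ([] : List (List Int)))
      = (List.range' 0 (r + 1)).map (Fcolex []) := by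
  rw [List.range'_succ, List.map_cons, Fcolex_zero]
  simp only [List.cons_append, List.nil_append, List.cons.injEq, true_and]
  exact replicate_eq_map_F r 0

theorem foldl_inv (p : List Int) (r : Nat) :
    p.foldl stepB ((List.range' 0 (r + 1)).map (Fcolex []))
      = (List.range' 0 (r + 1)).map (Fcolex p) := by
  induction p using List.reverseRecOn with
  | nil => rfl
  | append_singleton p x ih =>
    rw [List.foldl_append, List.foldl_cons, List.foldl_nil, ih, stepB_map x (Fcolex p) r]
    apply List.map_congr_left
    intro k hk
    cases k with
    | zero => simp [Fcolex_zero]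
    | succ m =>
      simp only [Nat.succ_ne_zero, if_false, Nat.succ_sub_one]
      exact (Fcolex_concat p x m).symm

theorem combosA_eq_nil (xs : List Int) (k : Nat) (h : xs.length < k) : combosA xs k = [] := by
  induction xs generalizing k with
  | nil => cases k with
    | zero => omega
    | succ m => rfl
  | cons x xs ih =>
    cases k with
    | zero => omega
    | succ m =>
      have h1 : xs.length < m := by simpa using h
      have h2 : xs.length < m + 1 := by omega
      simp [combosA, ih _ h1, ih _ h2]

theorem Fcolex_eq_nil (p : List Int) (k : Nat) (h : p.length < k) : Fcolex p k = [] := by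
  unfold Fcolex
  rw [combosA_eq_nil]
  · rfl
  · simpa using h

theorem alt_eq_F (elements : List Int) (r : Int) :
    support_basis_alt elements r = Fcolex elements r.toNat := by
  by_cases h : ((elements.length : Int) < r)
  · have e : support_basis_alt elements r = [] := by
      show (if ((elements.length : Int) < r) then ([] : List (List Int))
            else ((elements.foldl stepB ([[([] : List Int)]] ++ List.replicate r.toNat [])).getD r.toNat [])) = []
      rw [if_pos h]
    rw [e, Fcolex_eq_nil]
    omega
  · have e : support_basis_alt elements r
        = ((elements.foldl stepB ([[([] : List Int)]] ++ List.replicate r.toNat [])).getD r.toNat []) := by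
      show (if ((elements.length : Int) < r) then ([] : List (List Int))
            else ((elements.foldl stepB ([[([] : List Int)]] ++ List.replicate r.toNat [])).getD r.toNat [])) = _
      rw [if_neg h]
    rw [e, acc0_eq, foldl_inv]
    have hlen : r.toNat < ((List.range' 0 (r.toNat + 1)).map (Fcolex elements)).length := by simp
    rw [List.getD_eq_getElem _ _ hlen]
    simp

theorem a_eq_F (elements : List Int) (r : Int) :
    support_basis elements r = Fcolex elements r.toNat := by
  rfl

-- ===== VERDICT (by name: the statement is the Claim_ definition above) =====
theorem support_basis_spec : Claim_equal_support_basis := by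
  intro elements r _ _
  unfold Spec_support_basis
  rw [a_eq_F, alt_eq_F]
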